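-- pv_equiv track=rewrite | github.com/mbartnicki80/WDI | zestaw3/zad18zestaw3.py | czypal
-- ===== SOURCE A (Python) =====
-- def czypal(slice):
--
--     i = 0
--     j = len(slice)-1
--     suma = 0
--
--     while i<j:
--         if slice[i]!=slice[j] or slice[i]%2==0 or slice[j]%2==0:
--             return 0
--         suma += 2
--         i += 1
--         j -= 1
--
--     if i==j and slice[j]%2==1:
--         suma += 1
--     elif i==j:
--         return 0
--
--     return suma
-- ===== SOURCE B (Python) =====
-- def czypal(slice):
--     if slice == slice[::-1] and all(x % 2 == 1 for x in slice):
--         return len(slice)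
--     return 0
-- ===== Notes on version B (the rewrite author's own statement) =====
-- stated objective: simpler
-- what changed: Replaced the interleaved outside-in two-pointer sweep with a sum counter by two separate declarative passes: a reverse-and-compare palindrome test followed by an all-elements oddness scan, returning len(slice) or 0.
import Mathlib
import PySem

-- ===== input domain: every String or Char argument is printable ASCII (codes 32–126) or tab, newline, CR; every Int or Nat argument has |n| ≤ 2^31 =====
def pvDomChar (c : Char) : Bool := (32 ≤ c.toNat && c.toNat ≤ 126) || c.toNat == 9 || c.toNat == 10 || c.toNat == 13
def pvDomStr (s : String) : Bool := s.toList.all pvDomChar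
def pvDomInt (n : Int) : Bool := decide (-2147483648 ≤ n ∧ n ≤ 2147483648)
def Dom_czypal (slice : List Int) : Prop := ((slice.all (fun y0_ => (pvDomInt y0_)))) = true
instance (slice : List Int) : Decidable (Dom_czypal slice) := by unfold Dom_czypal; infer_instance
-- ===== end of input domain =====

-- B replaces A's interleaved two-pointer sweep by a reverse-and-compare palindrome test plus a
-- separate oddness scan (objective: simpler).

-- ===== PORT A =====
-- while i<j loop of A; indices are always in range when reached, so pyGetD's default is never used
def czypalLoop (slice : List Int) (i j suma : Int) : Int :=
  if i < j then
    if PySem.List.pyGetD slice i 0 ≠ PySem.List.pyGetD slice j 0 ∨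
       PySem.Int.mod (PySem.List.pyGetD slice i 0) 2 = 0 ∨
       PySem.Int.mod (PySem.List.pyGetD slice j 0) 2 = 0 then 0
    else czypalLoop slice (i + 1) (j - 1) (suma + 2)
  else if i = j ∧ PySem.Int.mod (PySem.List.pyGetD slice j 0) 2 = 1 then suma + 1
  else if i = j then 0
  else suma
termination_by (j - i).toNat
decreasing_by omega

def czypal (slice : List Int) : Int :=
  czypalLoop slice 0 ((slice.length : Int) - 1) 0

-- ===== PORT B =====
def czypal_alt (slice : List Int) : Int :=
  if slice = (PySem.List.slice? slice none none (-1)).getD [] ∧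
     slice.all (fun x => PySem.Int.mod x 2 == 1) = true then
    (slice.length : Int)
  else 0

-- ===== PRECONDITION & SPEC =====
def Spec_czypal (slice : List Int) (out : Int) : Prop := out = czypal_alt slice
instance (slice : List Int) (out : Int) : Decidable (Spec_czypal slice out) := by unfold Spec_czypal; infer_instance

-- ===== CLAIM (what is proved, stated in full; the proofs are below) =====
def Claim_equal_czypal : Prop := ∀ (slice : List Int), Dom_czypal slice → Spec_czypal slice (czypal slice)

-- ===== LEMMAS AND PROOFS =====

-- mod by 2 is 0 or 1
lemma mod2_cases (x : Int) : PySem.Int.mod x 2 = 0 ∨ PySem.Int.mod x 2 = 1 := by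
  have h1 := PySem.Int.mod_nonneg x (b := 2) (by norm_num)
  have h2 := PySem.Int.mod_lt x (b := 2) (by norm_num)
  omega

lemma reverse_eq_iff (l : List Int) :
    l.reverse = l ↔ ∀ k, k < l.length → l.getD k 0 = l.getD (l.length - 1 - k) 0 := by
  constructor
  · intro h k hk
    have hrev : l.reverse.getD k 0 = l.getD (l.length - 1 - k) 0 := by
      rw [List.getD_eq_getElem l.reverse 0 (by simpa using hk),
          List.getD_eq_getElem l 0 (by omega), List.getElem_reverse]
    rw [← hrev, h]
  · intro h
    apply List.ext_getElem (by simp)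
    intro k h1 h2
    rw [List.getElem_reverse]
    have := h k (by simpa using h2)
    rwa [List.getD_eq_getElem l 0 (by simpa using h2),
         List.getD_eq_getElem l 0 (by omega), eq_comm] at this

lemma all_odd_iff (l : List Int) :
    (l.all (fun x => PySem.Int.mod x 2 == 1) = true) ↔
      ∀ k, k < l.length → PySem.Int.mod (l.getD k 0) 2 = 1 := by
  rw [List.all_eq_true]
  constructor
  · intro h k hk
    rw [List.getD_eq_getElem l 0 hk]
    simpa using h _ (List.getElem_mem hk)
  · intro h x hx
    obtain ⟨k, hk, rfl⟩ := List.mem_iff_getElem.mp hx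
    have := h k hk
    rw [List.getD_eq_getElem l 0 hk] at this
    simpa using this

-- B returns 0 when some mirror pair fails (unequal or even)
lemma alt_eq_zero (slice : List Int) (k : Nat) (hk : k < slice.length)
    (h : ¬ (slice.getD k 0 = slice.getD (slice.length - 1 - k) 0 ∧
            PySem.Int.mod (slice.getD k 0) 2 = 1)) :
    czypal_alt slice = 0 := by
  unfold czypal_alt
  rw [PySem.List.slice?_none_none_neg_one]
  rw [if_neg]
  rintro ⟨hpal, hodd⟩
  exact h ⟨(reverse_eq_iff slice).mp hpal.symm k hk, (all_odd_iff slice).mp hodd k hk⟩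

-- B returns the length when every mirror pair matches and every element is odd
lemma alt_eq_len (slice : List Int)
    (hpal : ∀ k, k < slice.length → slice.getD k 0 = slice.getD (slice.length - 1 - k) 0)
    (hodd : ∀ k, k < slice.length → PySem.Int.mod (slice.getD k 0) 2 = 1) :
    czypal_alt slice = (slice.length : Int) := by
  unfold czypal_alt
  rw [PySem.List.slice?_none_none_neg_one]
  rw [if_pos]
  exact ⟨((reverse_eq_iff slice).mpr hpal).symm, (all_odd_iff slice).mpr hodd⟩

lemma pyGetD_nat (slice : List Int) (k : Nat) : PySem.List.pyGetD slice (k : Int) 0 = slice.getD k 0 := by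
  simp

-- loop invariant: after verifying the first i mirror pairs, the loop computes B's answer
lemma loop_main (slice : List Int) :
    ∀ (m i : Nat), 2 * i ≤ slice.length → slice.length - 2 * i ≤ m →
      (∀ k, k < i → slice.getD k 0 = slice.getD (slice.length - 1 - k) 0 ∧
                    PySem.Int.mod (slice.getD k 0) 2 = 1) →
      czypalLoop slice (i : Int) ((slice.length : Int) - 1 - (i : Int)) (2 * (i : Int)) =
        czypal_alt slice := by
  intro m
  induction m with
  | zero =>
    intro i hle hm H
    -- slice.length = 2 * i : the two pointers have crossed; everything is verified
    have hn : slice.length = 2 * i := by omega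
    rw [czypalLoop]
    rw [if_neg (by omega), if_neg (by rintro ⟨h, -⟩; omega), if_neg (by omega)]
    have key : ∀ k, k < slice.length →
        slice.getD k 0 = slice.getD (slice.length - 1 - k) 0 ∧
        PySem.Int.mod (slice.getD k 0) 2 = 1 := by
      intro k hk
      by_cases hki : k < i
      · exact H k hki
      · have hk' : slice.length - 1 - k < i := by omega
        obtain ⟨he, ho⟩ := H _ hk'
        have : slice.length - 1 - (slice.length - 1 - k) = k := by omega
        rw [this] at he
        exact ⟨he.symm, he ▸ ho⟩
    rw [alt_eq_len slice (fun k hk => (key k hk).1) (fun k hk => (key k hk).2)]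
    omega
  | succ m ih =>
    intro i hle hm H
    rw [czypalLoop]
    by_cases hij : (i : Int) < (slice.length : Int) - 1 - (i : Int)
    · -- loop body: i < j
      have hi : i < slice.length := by omega
      have hj : slice.length - 1 - i < slice.length := by omega
      have hcast : ((slice.length : Int) - 1 - (i : Int)) = ((slice.length - 1 - i : Nat) : Int) := by
        omega
      rw [if_pos hij, hcast, pyGetD_nat, pyGetD_nat]
      by_cases hc : slice.getD i 0 ≠ slice.getD (slice.length - 1 - i) 0 ∨
          PySem.Int.mod (slice.getD i 0) 2 = 0 ∨
          PySem.Int.mod (slice.getD (slice.length - 1 - i) 0) 2 = 0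
      · rw [if_pos hc]
        refine (alt_eq_zero slice i hi ?_).symm
        rintro ⟨he, ho⟩
        rcases hc with h | h | h
        · exact h he
        · omega
        · rw [← he] at h; omega
      · rw [if_neg hc]
        push Not at hc
        obtain ⟨he, ho1, ho2⟩ := hc
        have hok : slice.getD i 0 = slice.getD (slice.length - 1 - i) 0 ∧
            PySem.Int.mod (slice.getD i 0) 2 = 1 := by
          refine ⟨he, ?_⟩
          rcases mod2_cases (slice.getD i 0) with h | h
          · exact absurd h ho1
          · exact h
        have h1 : ((i : Int) + 1) = ((i + 1 : Nat) : Int) := by push_cast; ring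
        have h2 : ((slice.length - 1 - i : Nat) : Int) - 1 =
            (slice.length : Int) - 1 - ((i + 1 : Nat) : Int) := by omega
        have h3 : (2 * (i : Int) + 2) = 2 * ((i + 1 : Nat) : Int) := by push_cast; ring
        rw [h1, h2, h3]
        apply ih (i + 1) (by omega) (by omega)
        intro k hk
        rcases Nat.lt_succ_iff_lt_or_eq.mp hk with hk' | rfl
        · exact H k hk'
        · exact hok
    · -- loop exit
      rw [if_neg hij]
      by_cases heq : (i : Int) = (slice.length : Int) - 1 - (i : Int)
      · -- i = j : odd length, middle element
        have hn : slice.length = 2 * i + 1 := by omega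
        have hi : i < slice.length := by omega
        have hcast : ((slice.length : Int) - 1 - (i : Int)) = ((i : Nat) : Int) := by omega
        rw [hcast, pyGetD_nat]
        by_cases hmid : PySem.Int.mod (slice.getD i 0) 2 = 1
        · rw [if_pos ⟨by omega, hmid⟩]
          have key : ∀ k, k < slice.length →
              slice.getD k 0 = slice.getD (slice.length - 1 - k) 0 ∧
              PySem.Int.mod (slice.getD k 0) 2 = 1 := by
            intro k hk
            by_cases hki : k < i
            · exact H k hki
            · by_cases hke : k = i
              · subst hke
                exact ⟨by rw [show slice.length - 1 - k = k by omega], hmid⟩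
              · have hk' : slice.length - 1 - k < i := by omega
                obtain ⟨he, ho⟩ := H _ hk'
                have : slice.length - 1 - (slice.length - 1 - k) = k := by omega
                rw [this] at he
                exact ⟨he.symm, he ▸ ho⟩
          rw [alt_eq_len slice (fun k hk => (key k hk).1) (fun k hk => (key k hk).2)]
          omega
        · rw [if_neg (by rintro ⟨-, h⟩; exact hmid h), if_pos (by omega)]
          refine (alt_eq_zero slice i hi ?_).symm
          rintro ⟨-, ho⟩
          exact hmid ho
      · -- i = j + 1 : even length, everything verified
        have hn : slice.length = 2 * i := by omega
        rw [if_neg (by rintro ⟨h, -⟩; exact heq h), if_neg heq]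
        have key : ∀ k, k < slice.length →
            slice.getD k 0 = slice.getD (slice.length - 1 - k) 0 ∧
            PySem.Int.mod (slice.getD k 0) 2 = 1 := by
          intro k hk
          by_cases hki : k < i
          · exact H k hki
          · have hk' : slice.length - 1 - k < i := by omega
            obtain ⟨he, ho⟩ := H _ hk'
            have : slice.length - 1 - (slice.length - 1 - k) = k := by omega
            rw [this] at he
            exact ⟨he.symm, he ▸ ho⟩
        rw [alt_eq_len slice (fun k hk => (key k hk).1) (fun k hk => (key k hk).2)]
        omega

-- ===== VERDICT (by name: the statement is the Claim_ definition above) =====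
theorem czypal_spec : Claim_equal_czypal := by
  intro slice _
  unfold Spec_czypal czypal
  have := loop_main slice slice.length 0 (by omega) (by omega) (by omega)
  simpa using this
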